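-- pv_equiv track=rewrite | github.com/seniortasse/SudokuCompanionToolkit-v3 | python/puzzle_generator/non-pattern_sudoku_all_sizes/generator/techniques/singles.py | _group_hits
-- ===== SOURCE A (Python) =====
-- from collections import defaultdict
-- import operator
--
-- def _group_hits(hits):
--     grouped_idxs = defaultdict(list)
--     for hit in hits:
--         grouped_idxs[hit[0]].append(hit)
--     grouped_hits = [
--         (idx, _singles[0][1], " & ".join(_single[-1] for _single in _singles))
--         for idx, _singles in grouped_idxs.items()
--     ]
--     # TODO This grouping functionality does not guarantee the same ordering in different runs, and requires additional
--     #  sorting (we want the same result for multiple runs mostly for testing purposes)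
--     #  -> This does mess up the order of displaying first rows then cols then boxes, but this can be fixed manually by
--     #     custom sorting later
--     grouped_hits = sorted(grouped_hits, key=operator.itemgetter(0))
--     return grouped_hits
-- ===== SOURCE B (Python) =====
-- def _group_hits(hits):
--     out = []
--     for idx in sorted({h[0] for h in hits}):
--         matches = [h for h in hits if h[0] == idx]
--         out.append((idx, matches[0][1], " & ".join(h[-1] for h in matches)))
--     return out
-- ===== Notes on version B (the rewrite author's own statement) =====
-- stated objective: simpler
-- what changed: Replaces the defaultdict accumulator plus trailing sort of grouped triples by iterating the sorted distinct indices directly and filtering the hits once per index, building the output already in order.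
import Mathlib
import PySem

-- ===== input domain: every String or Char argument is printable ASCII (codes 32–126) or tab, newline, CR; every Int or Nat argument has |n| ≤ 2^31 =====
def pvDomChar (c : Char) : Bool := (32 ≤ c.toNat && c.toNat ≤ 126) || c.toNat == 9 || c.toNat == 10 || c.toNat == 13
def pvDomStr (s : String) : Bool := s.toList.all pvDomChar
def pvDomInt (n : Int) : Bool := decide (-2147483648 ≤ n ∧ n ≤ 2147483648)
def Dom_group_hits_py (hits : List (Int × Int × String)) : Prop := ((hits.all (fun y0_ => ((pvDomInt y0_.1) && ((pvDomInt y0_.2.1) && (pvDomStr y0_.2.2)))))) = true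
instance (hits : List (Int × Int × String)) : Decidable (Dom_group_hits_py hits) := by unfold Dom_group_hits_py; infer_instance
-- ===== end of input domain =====

-- B replaces A's defaultdict accumulator + trailing sort by iterating the sorted distinct
-- indices and filtering the hits per index, building the output already in order (simpler).

-- ===== PORT A =====
-- grouped_idxs[hit[0]].append(hit)  is  d.modify hit[0] [] (· ++ [hit])  (defaultdict(list)).
-- `_singles[0][1]`: the dict's value lists are never empty, so Python never raises here;
-- ported as pyGetD with a dummy default (exact on every reachable list).
-- `_single[-1]` on a 3-tuple is its last component, h.2.2.
def group_hits_py (hits : List (Int × Int × String)) : List (Int × Int × String) :=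
  let grouped_idxs : PySem.Dict Int (List (Int × Int × String)) :=
    hits.foldl (fun d hit => d.modify hit.1 [] (fun l => l ++ [hit])) PySem.Dict.empty
  let grouped_hits : List (Int × Int × String) :=
    grouped_idxs.items.map (fun p =>
      (p.1, (PySem.List.pyGetD p.2 0 (0, 0, "")).2.1,
       PySem.Str.join " & " (p.2.map (fun s => s.2.2))))
  PySem.List.sorted grouped_hits (fun t => t.1) false

-- ===== PORT B =====
-- for idx in sorted({h[0] for h in hits}): matches = [h for h in hits if h[0] == idx]; append triple.
-- `matches[0][1]`: matches is nonempty for every idx drawn from the hits, ported as pyGetD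
-- with a dummy default (exact on every reachable list).
def group_hits_py_alt (hits : List (Int × Int × String)) : List (Int × Int × String) :=
  (PySem.List.sorted (PySem.Set.ofList (hits.map (fun h => h.1))) (fun x => x) false).foldl
    (fun out idx =>
      let ms := hits.filter (fun h => h.1 == idx)
      out ++ [(idx, (PySem.List.pyGetD ms 0 (0, 0, "")).2.1,
               PySem.Str.join " & " (ms.map (fun h => h.2.2)))]) []

-- ===== PRECONDITION & SPEC =====
def Spec_group_hits_py (hits : List (Int × Int × String)) (out : List (Int × Int × String)) : Prop := out = group_hits_py_alt hits
instance (hits : List (Int × Int × String)) (out : List (Int × Int × String)) : Decidable (Spec_group_hits_py hits out) := by unfold Spec_group_hits_py; infer_instance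

-- ===== CLAIM (what is proved, stated in full; the proofs are below) =====
def Claim_equal_group_hits_py : Prop := ∀ (hits : List (Int × Int × String)), Dom_group_hits_py hits → Spec_group_hits_py hits (group_hits_py hits)

-- ===== LEMMAS AND PROOFS =====

-- The keys of A's grouping dict are the distinct first components, in first-occurrence order.
theorem keys_groupFold (hits : List (Int × Int × String))
    (d : PySem.Dict Int (List (Int × Int × String))) :
    (hits.foldl (fun d hit => d.modify hit.1 [] (fun l => l ++ [hit])) d).keys
      = (hits.map (fun h => h.1)).foldl PySem.Set.add d.keys := by
  induction hits generalizing d with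
  | nil => simp
  | cons h t ih =>
    simp only [List.foldl_cons, List.map_cons, ih]
    congr 1
    rw [PySem.Dict.keys_modify, PySem.Set.add_eq_ite]
    by_cases hc : d.contains h.1 = true
    · rw [PySem.Dict.keys_insert_of_contains _ _ hc,
        if_pos ((PySem.Dict.contains_iff_mem_keys d h.1).mp hc)]
    · rw [PySem.Dict.keys_insert_of_not_contains _ _ (by simpa using hc),
        if_neg (fun hm => hc ((PySem.Dict.contains_iff_mem_keys d h.1).mpr hm))]

-- Each value list of A's grouping dict is the filter of the hits by that key.
theorem getD_groupFold (hits : List (Int × Int × String)) (k : Int) :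
    (hits.foldl (fun d hit => d.modify hit.1 [] (fun l => l ++ [hit])) PySem.Dict.empty).getD k []
      = hits.filter (fun h => h.1 == k) := by
  have := PySem.Dict.getD_foldl_modify_append
    (hits.map (fun h => (h.1, h))) (PySem.Dict.empty (κ := Int) (ν := List (Int × Int × String))) k
  rw [List.foldl_map] at this
  simpa [List.filter_map, Function.comp_def] using this

-- ===== VERDICT (by name: the statement is the Claim_ definition above) =====
theorem group_hits_py_spec : Claim_equal_group_hits_py := by
  intro hits _
  set G : Int → Int × Int × String := fun k =>
    (k, (PySem.List.pyGetD (hits.filter (fun h => h.1 == k)) 0 (0, 0, "")).2.1,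
     PySem.Str.join " & " ((hits.filter (fun h => h.1 == k)).map (fun h => h.2.2))) with hG
  show PySem.List.sorted
      (((hits.foldl (fun d hit => d.modify hit.1 [] (fun l => l ++ [hit]))
          PySem.Dict.empty).items).map (fun p =>
        (p.1, (PySem.List.pyGetD p.2 0 (0, 0, "")).2.1,
         PySem.Str.join " & " (p.2.map (fun s => s.2.2)))))
      (fun t => t.1) false
    = (PySem.List.sorted (PySem.Set.ofList (hits.map (fun h => h.1))) (fun x => x) false).foldl
        (fun out idx => out ++ [G idx]) []
  have hkeys :
      (hits.foldl (fun d hit => d.modify hit.1 [] (fun l => l ++ [hit])) PySem.Dict.empty).keys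
        = PySem.Set.ofList (hits.map (fun h => h.1)) := by
    rw [keys_groupFold]; rfl
  have hnd :
      (hits.foldl (fun d hit => d.modify hit.1 [] (fun l => l ++ [hit])) PySem.Dict.empty).keys.Nodup := by
    rw [hkeys]; exact PySem.Set.nodup_ofList _
  rw [PySem.List.foldl_append_singleton_eq_map, List.nil_append,
    PySem.Dict.items_eq_map_keys _ hnd [], hkeys, List.map_map,
    List.map_congr_left (g := G) (fun k _ => by
      simp only [Function.comp_apply, getD_groupFold, hG])]
  refine PySem.List.sorted_eq_of_perm_of_pairwise_lt _ _ _
    (List.Perm.map G (PySem.List.sorted_perm _ _ _)) ?_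
  have := PySem.List.sorted_ofList_pairwise_lt (hits.map (fun h => h.1))
  rw [List.pairwise_map]
  exact this.imp (fun hab => by simp [hG, hab])
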